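-- pv_equiv track=rewrite | github.com/samjsnn/combinatorics-problem | coin_main.py | coin_combinations_triple
-- ===== SOURCE A (Python) =====
-- def coin_combinations_triple(amount, primes, min_coins, max_coins):
--     # Calculate the number of ways to make the given amount using three different coin denominations
--     count = [0]
--
--     def backtrack(curr_amount, num_coins, start):
--         if num_coins == 0:
--             if curr_amount == 0:
--                 count[0] += 1
--             return
--
--         for i in range(start, len(primes)):
--             if curr_amount < primes[i]:
--                 break
--             backtrack(curr_amount - primes[i], num_coins - 1, i)
--
--     for num_coins in range(min_coins, max_coins + 1):
--         backtrack(amount, num_coins, 0)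
--
--     return count[0]
-- ===== SOURCE B (Python) =====
-- def coin_combinations_triple(amount, primes, min_coins, max_coins):
--     # Memoized take/skip recursion over states (amount, coins_left, start), shared across
--     # all coin counts, instead of A's backtracking loop re-run from
--     # scratch for every num_coins with a mutated shared counter.
--     memo = {}
--
--     def ways(a, k, s):
--         # ways using exactly k coins from primes[s:], honouring the early-stop
--         # rule: a < primes[s] kills index s and everything after it.
--         if k == 0:
--             return 1 if a == 0 else 0
--         if s == len(primes) or a < primes[s]:
--             return 0
--         key = (a, k, s)
--         if key in memo:
--             return memo[key]
--         total = ways(a - primes[s], k - 1, s) + ways(a, k, s + 1)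
--         memo[key] = total
--         return total
--
--     result = 0
--     for k in range(min_coins, max_coins + 1):
--         result += ways(amount, k, 0)
--     return result
-- ===== Notes on version B (the rewrite author's own statement) =====
-- stated objective: alternative
-- what changed: Replaces A's backtracking loop (re-run from scratch for every num_coins, mutating a shared counter) by a take/skip recursion over (amount, coins_left, start) that returns values and memoizes each state in a dict shared across all coin counts.
-- outside the precondition, e.g. on coin_combinations_triple(3, [1], -1, -1): A returns 0, B returns 0
import Mathlib
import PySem

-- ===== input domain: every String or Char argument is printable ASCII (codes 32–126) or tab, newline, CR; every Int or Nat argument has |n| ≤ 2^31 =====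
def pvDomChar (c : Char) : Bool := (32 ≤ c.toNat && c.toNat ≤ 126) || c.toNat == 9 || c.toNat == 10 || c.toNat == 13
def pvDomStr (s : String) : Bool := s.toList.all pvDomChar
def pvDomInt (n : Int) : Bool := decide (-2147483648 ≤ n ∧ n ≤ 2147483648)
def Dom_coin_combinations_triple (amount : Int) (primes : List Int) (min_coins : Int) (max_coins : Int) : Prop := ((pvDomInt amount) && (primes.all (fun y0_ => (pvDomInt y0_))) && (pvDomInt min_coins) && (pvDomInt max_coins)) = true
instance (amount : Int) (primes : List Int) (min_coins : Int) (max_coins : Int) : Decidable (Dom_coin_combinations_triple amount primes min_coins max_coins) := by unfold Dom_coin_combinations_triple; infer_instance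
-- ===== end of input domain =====

-- B replaces A's backtracking loop (re-run from scratch for each coin count, mutating a
-- shared counter) by a memoized take/skip recursion over (amount, coins_left, start)
-- whose table is shared across all coin counts.

-- ===== PORT A =====
-- A's nested `backtrack` mutates the shared counter count[0]; the port threads it as
-- the accumulator c.  num_coins is a nonnegative Nat here: inside Pre_ every num_coins
-- that actually recurses is ≥ 0, and the `k < 0` guard at the call site only makes the
-- port total (Python can recurse unboundedly on negative counts; excluded by Pre_).
mutual
def pvBt (primes : List Int) (a : Int) (n : Nat) (s : Nat) (c : Int) : Int :=
  if n = 0 then (if a = 0 then c + 1 else c)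
  else pvBtLoop primes a (n - 1) s c
  termination_by (n, primes.length - s, 0)

def pvBtLoop (primes : List Int) (a : Int) (m : Nat) (s : Nat) (c : Int) : Int :=
  if h : s < primes.length then
    if a < primes[s] then c
    else pvBtLoop primes a m (s + 1) (pvBt primes (a - primes[s]) m s c)
  else c
  termination_by (m, primes.length - s, 1)
end

def coin_combinations_triple (amount : Int) (primes : List Int) (min_coins : Int) (max_coins : Int) : Int :=
  (PySem.List.pyRange min_coins (max_coins + 1) 1).foldl
    (fun c k => if k < 0 then c else pvBt primes amount k.toNat 0 c) 0

-- ===== PORT B =====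
-- port of Source B: the take/skip `ways` returns its value and threads the memo dict
-- (keys are the Python tuples (a, k, s)); the `k < 0` totality guard at the call
-- site mirrors port A's (negative coin counts: excluded by Pre_).
def pvWays (primes : List Int) (a : Int) (n : Nat) (s : Nat)
    (memo : PySem.Dict (Int × Int × Int) Int) : Int × PySem.Dict (Int × Int × Int) Int :=
  if n = 0 then ((if a = 0 then 1 else 0), memo)
  else if h : s < primes.length then
    if a < primes[s] then (0, memo)
    else
      match memo.get? (a, (n : Int), (s : Int)) with
      | some v => (v, memo)
      | none =>
        let r1 := pvWays primes (a - primes[s]) (n - 1) s memo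
        let r2 := pvWays primes a n (s + 1) r1.2
        let total := r1.1 + r2.1
        (total, r2.2.insert (a, (n : Int), (s : Int)) total)
  else (0, memo)
  termination_by (n, primes.length - s)

def coin_combinations_triple_alt (amount : Int) (primes : List Int) (min_coins : Int) (max_coins : Int) : Int :=
  ((PySem.List.pyRange min_coins (max_coins + 1) 1).foldl
    (fun st k => if k < 0 then st else
      let r := pvWays primes amount k.toNat 0 st.2
      (st.1 + r.1, r.2))
    (0, (PySem.Dict.mk [] : PySem.Dict (Int × Int × Int) Int))).1

-- ===== PRECONDITION & SPEC =====
-- Pre_ excludes ranges containing a negative coin count whose backtracking actually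
-- recurses (first prime ≤ amount): there Python A can recurse without bound and raises
-- RecursionError on many inputs (and returns 0 on the rest only via deep recursion the
-- total ports do not mirror); B behaves like A there as well.
def Pre_coin_combinations_triple (amount : Int) (primes : List Int) (min_coins : Int) (max_coins : Int) : Prop :=
  0 ≤ min_coins ∨ max_coins < min_coins ∨ amount < primes.headD (amount + 1)
instance (amount : Int) (primes : List Int) (min_coins : Int) (max_coins : Int) : Decidable (Pre_coin_combinations_triple amount primes min_coins max_coins) := by unfold Pre_coin_combinations_triple; infer_instance

def pvWitness_coin_combinations_triple : Int × List Int × Int × Int := (8, [2, 3, 5], 1, 3)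

def Spec_coin_combinations_triple (amount : Int) (primes : List Int) (min_coins : Int) (max_coins : Int) (out : Int) : Prop := out = coin_combinations_triple_alt amount primes min_coins max_coins
instance (amount : Int) (primes : List Int) (min_coins : Int) (max_coins : Int) (out : Int) : Decidable (Spec_coin_combinations_triple amount primes min_coins max_coins out) := by unfold Spec_coin_combinations_triple; infer_instance

-- ===== CLAIM (what is proved, stated in full; the proofs are below) =====
def Claim_equal_coin_combinations_triple : Prop := ∀ (amount : Int) (primes : List Int) (min_coins : Int) (max_coins : Int), Dom_coin_combinations_triple amount primes min_coins max_coins → Pre_coin_combinations_triple amount primes min_coins max_coins → Spec_coin_combinations_triple amount primes min_coins max_coins (coin_combinations_triple amount primes min_coins max_coins)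

-- ===== LEMMAS AND PROOFS =====

-- pure reference function: the value A's backtrack adds to the counter / B's ways returns
mutual
def pvW (primes : List Int) (a : Int) (n : Nat) (s : Nat) : Int :=
  if n = 0 then (if a = 0 then 1 else 0)
  else pvWL primes a (n - 1) s
  termination_by (n, primes.length - s, 0)

def pvWL (primes : List Int) (a : Int) (m : Nat) (s : Nat) : Int :=
  if h : s < primes.length then
    if a < primes[s] then 0
    else pvW primes (a - primes[s]) m s + pvWL primes a m (s + 1)
  else 0
  termination_by (m, primes.length - s, 1)
end

-- every value cached in the memo is the reference value of its state
def pvInv (primes : List Int) (d : PySem.Dict (Int × Int × Int) Int) : Prop :=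
  ∀ (a : Int) (n s : Nat) (v : Int),
    d.get? (a, (n : Int), (s : Int)) = some v → v = pvW primes a n s

lemma pvBtLoop_eq (primes : List Int) (m : Nat)
    (ih : ∀ a s c, pvBt primes a m s c = c + pvW primes a m s) :
    ∀ (f s : Nat), primes.length - s ≤ f → ∀ a c,
      pvBtLoop primes a m s c = c + pvWL primes a m s := by
  intro f
  induction f with
  | zero =>
    intro s hs a c
    rw [pvBtLoop.eq_def, pvWL.eq_def]
    have : ¬ s < primes.length := by omega
    simp [this]
  | succ f ihf =>
    intro s hs a c
    rw [pvBtLoop.eq_def, pvWL.eq_def]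
    by_cases h : s < primes.length
    · simp only [h, dif_pos]
      by_cases h2 : a < primes[s]
      · simp [h2]
      · simp only [h2, if_false]
        rw [ihf (s + 1) (by omega), ih]
        ring
    · simp [h]

lemma pvBt_eq (primes : List Int) :
    ∀ (n : Nat) (a : Int) (s : Nat) (c : Int),
      pvBt primes a n s c = c + pvW primes a n s := by
  intro n
  induction n with
  | zero => intro a s c; rw [pvBt.eq_def, pvW.eq_def]; split_ifs <;> omega
  | succ n ih =>
    intro a s c
    rw [pvBt.eq_def, pvW.eq_def]
    simp only [Nat.succ_ne_zero, if_false, Nat.add_sub_cancel]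
    exact pvBtLoop_eq primes n ih primes.length s (by omega) a c

lemma pvInv_mk_nil (primes : List Int) : pvInv primes (PySem.Dict.mk []) := by
  intro a n s v hv
  simp [PySem.Dict.get?] at hv

lemma pvWays_eq (primes : List Int) :
    ∀ (n f s : Nat), primes.length - s ≤ f → ∀ (a : Int) memo, pvInv primes memo →
      (pvWays primes a n s memo).1 = pvW primes a n s ∧
      pvInv primes (pvWays primes a n s memo).2 := by
  intro n
  induction n with
  | zero =>
    intro f s _ a memo hmemo
    rw [pvWays.eq_def, pvW.eq_def]; simp [hmemo]
  | succ n ih =>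
    intro f
    induction f with
    | zero =>
      intro s hs a memo hmemo
      rw [pvWays.eq_def, pvW.eq_def, pvWL.eq_def]
      have h : ¬ s < primes.length := by omega
      simp [h, hmemo]
    | succ f ihf =>
      intro s hs a memo hmemo
      rw [pvWays.eq_def, pvW.eq_def]
      simp only [Nat.succ_ne_zero, if_false, Nat.add_sub_cancel]
      by_cases h : s < primes.length
      · simp only [h, dif_pos]
        rw [pvWL.eq_def]
        simp only [h, dif_pos]
        by_cases h2 : a < primes[s]
        · simp [h2, hmemo]
        · simp only [h2, if_false]
          cases hget : memo.get? (a, ((n + 1 : Nat) : Int), (s : Int)) with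
          | some v =>
            refine ⟨?_, hmemo⟩
            have := hmemo a (n + 1) s v hget
            rw [this, pvW.eq_def]
            simp only [Nat.succ_ne_zero, if_false, Nat.add_sub_cancel]
            rw [pvWL.eq_def]
            simp [h, h2]
          | none =>
            obtain ⟨h11, h12⟩ := ih primes.length s (by omega) (a - primes[s]) memo hmemo
            obtain ⟨h21, h22⟩ := ihf (s + 1) (by omega) a (pvWays primes (a - primes[s]) n s memo).2 h12
            have hskip : pvW primes a (n + 1) (s + 1) = pvWL primes a n (s + 1) := by
              rw [pvW.eq_def]
              simp only [Nat.succ_ne_zero, if_false, Nat.add_sub_cancel]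
            constructor
            · simp only [h11, h21, hskip]
            · intro a' n' s' v hv
              rw [PySem.Dict.get?_insert] at hv
              by_cases heq : ((a' : Int), ((n' : Nat) : Int), ((s' : Nat) : Int)) = ((a : Int), ((n + 1 : Nat) : Int), ((s : Nat) : Int))
              · simp only [heq, if_pos] at hv
                have ha : a' = a := congrArg Prod.fst heq
                have hn' : n' = n + 1 := by
                  have := congrArg (fun p : Int × Int × Int => p.2.1) heq
                  simp only [] at this
                  exact_mod_cast this
                have hs' : s' = s := by
                  have := congrArg (fun p : Int × Int × Int => p.2.2) heq
                  simp only [] at this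
                  exact_mod_cast this
                subst ha; subst hn'; subst hs'
                rw [← Option.some_inj.mp hv, h11, h21, hskip]
                conv_rhs => rw [pvW.eq_def]
                simp only [Nat.succ_ne_zero, if_false, Nat.add_sub_cancel]
                conv_rhs => rw [pvWL.eq_def]
                simp [h, h2]
              · rw [if_neg heq] at hv
                exact h22 a' n' s' v hv
      · rw [pvWL.eq_def]
        simp [h, hmemo]

lemma pvFold_eq (primes : List Int) (amount : Int) :
    ∀ (L : List Int) (c : Int) memo, pvInv primes memo →
      (L.foldl (fun st k => if k < 0 then st else
          let r := pvWays primes amount k.toNat 0 st.2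
          (st.1 + r.1, r.2)) (c, memo)).1
      = L.foldl (fun c k => if k < 0 then c else pvBt primes amount k.toNat 0 c) c := by
  intro L
  induction L with
  | nil => intro c memo _; rfl
  | cons k L ihL =>
    intro c memo hmemo
    by_cases hk : k < 0
    · simp only [List.foldl_cons, hk, if_pos]
      exact ihL c memo hmemo
    · simp only [List.foldl_cons, hk, if_false]
      obtain ⟨h1, h2⟩ := pvWays_eq primes k.toNat primes.length 0 (by omega) amount memo hmemo
      rw [pvBt_eq, ← h1]
      exact ihL _ _ h2

-- ===== VERDICT (by name: the statement is the Claim_ definition above) =====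
theorem coin_combinations_triple_spec : Claim_equal_coin_combinations_triple := by
  intro amount primes min_coins max_coins _ _
  unfold Spec_coin_combinations_triple coin_combinations_triple coin_combinations_triple_alt
  rw [pvFold_eq primes amount _ 0 _ (pvInv_mk_nil primes)]
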